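-- pv_equiv track=rewrite | github.com/digitalepidemiologylab/crowdbreaks-streamer | moob/moob/train.py | prequential
-- ===== SOURCE A (Python) =====
-- def prequential(n_chunks, n_instances, interval, chunk_size):
--     all_chunks_list = []
--     lower_bound = - interval
--     n_windows = (n_chunks - 1) * 2
--
--     for i in range(n_windows):
--         lower_bound += interval
--         if i == n_windows - 1:
--             upper_bound = n_instances
--         else:
--             upper_bound = lower_bound + chunk_size
--         all_chunks_list.append([lower_bound, upper_bound])
--
--     return all_chunks_list
-- ===== SOURCE B (Python) =====
-- def prequential(n_chunks, n_instances, interval, chunk_size):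
--     n_windows = (n_chunks - 1) * 2
--     if n_windows <= 0:
--         return []
--     # build the window list back to front: last window first, then prepend
--     # (via append on a reversed buffer) the plain windows [i*interval, i*interval+chunk_size]
--     rev = [[(n_windows - 1) * interval, n_instances]]
--     for i in range(n_windows - 2, -1, -1):
--         lo = i * interval
--         rev.append([lo, lo + chunk_size])
--     rev.reverse()
--     return rev
-- ===== Notes on version B (the rewrite author's own statement) =====
-- stated objective: alternative
-- what changed: Builds the window list back to front: places the special final window [(n_windows-1)*interval, n_instances] first, appends the ordinary windows over a descending range onto a reversed buffer with closed-form lower bounds i*interval (no running accumulator, no per-iteration last-window branch), then reverses the buffer once.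
import Mathlib
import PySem

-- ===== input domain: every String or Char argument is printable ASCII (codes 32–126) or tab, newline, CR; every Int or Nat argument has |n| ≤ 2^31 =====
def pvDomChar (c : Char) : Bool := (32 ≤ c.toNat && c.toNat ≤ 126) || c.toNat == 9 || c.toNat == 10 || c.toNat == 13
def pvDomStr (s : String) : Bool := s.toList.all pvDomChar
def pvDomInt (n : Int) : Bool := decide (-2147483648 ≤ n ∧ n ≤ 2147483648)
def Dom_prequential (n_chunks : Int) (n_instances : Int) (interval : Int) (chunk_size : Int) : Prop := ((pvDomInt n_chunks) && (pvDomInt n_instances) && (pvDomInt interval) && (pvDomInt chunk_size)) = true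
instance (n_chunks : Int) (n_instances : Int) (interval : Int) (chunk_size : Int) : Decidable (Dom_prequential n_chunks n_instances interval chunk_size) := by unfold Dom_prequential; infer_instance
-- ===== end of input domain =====

-- B builds the list back to front: the special last window is placed first, the ordinary windows
-- (closed-form bounds, no accumulator, no per-iteration branch) are appended over a descending
-- range, and the buffer is reversed once (objective: alternative decomposition, same cost).

-- ===== PORT A =====
-- literal transliteration of A's forward accumulator loop (state = built list × lower_bound)
def prequential (n_chunks : Int) (n_instances : Int) (interval : Int) (chunk_size : Int) : List (List Int) :=
  let n_windows : Int := (n_chunks - 1) * 2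
  let st := (PySem.List.pyRange 0 n_windows 1).foldl
    (fun (st : Array (List Int) × Int) i =>
      let lower_bound := st.2 + interval
      let upper_bound := if i = n_windows - 1 then n_instances else lower_bound + chunk_size
      (st.1.push [lower_bound, upper_bound], lower_bound))
    (#[], -interval)
  st.1.toList

-- ===== PORT B =====
-- literal transliteration of Source B: seed the reversed buffer with the final window,
-- append ordinary windows over range(n_windows-2, -1, -1), then reverse
def prequential_alt (n_chunks : Int) (n_instances : Int) (interval : Int) (chunk_size : Int) : List (List Int) :=
  let n_windows : Int := (n_chunks - 1) * 2
  if n_windows ≤ 0 then []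
  else
    let rev := (PySem.List.pyRange (n_windows - 2) (-1) (-1)).foldl
      (fun (acc : Array (List Int)) i =>
        let lo := i * interval
        acc.push [lo, lo + chunk_size])
      #[[(n_windows - 1) * interval, n_instances]]
    rev.toList.reverse

-- ===== PRECONDITION & SPEC =====
def Spec_prequential (n_chunks : Int) (n_instances : Int) (interval : Int) (chunk_size : Int) (out : List (List Int)) : Prop := out = prequential_alt n_chunks n_instances interval chunk_size
instance (n_chunks : Int) (n_instances : Int) (interval : Int) (chunk_size : Int) (out : List (List Int)) : Decidable (Spec_prequential n_chunks n_instances interval chunk_size out) := by unfold Spec_prequential; infer_instance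

-- ===== CLAIM (what is proved, stated in full; the proofs are below) =====
def Claim_equal_prequential : Prop := ∀ (n_chunks : Int) (n_instances : Int) (interval : Int) (chunk_size : Int), Dom_prequential n_chunks n_instances interval chunk_size → Spec_prequential n_chunks n_instances interval chunk_size (prequential n_chunks n_instances interval chunk_size)

-- ===== LEMMAS AND PROOFS =====

-- a fold that pushes onto an Array component is the same fold appending to its list
theorem foldl_push_pair {ι β : Type} (l : List ι) (e : β → ι → List Int) (u : β → ι → β)
    (a : Array (List Int)) (b : β) :
    (((l.foldl (fun (st : Array (List Int) × β) i => (st.1.push (e st.2 i), u st.2 i)) (a, b)).1.toList),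
     ((l.foldl (fun (st : Array (List Int) × β) i => (st.1.push (e st.2 i), u st.2 i)) (a, b)).2))
    = l.foldl (fun (st : List (List Int) × β) i => (st.1 ++ [e st.2 i], u st.2 i)) (a.toList, b) := by
  induction l generalizing a b with
  | nil => simp
  | cons i t ih =>
    simp only [List.foldl_cons]
    rw [ih (a.push (e b i)) (u b i)]
    simp

theorem foldl_push_simple {ι : Type} (l : List ι) (e : ι → List Int) (a : Array (List Int)) :
    (l.foldl (fun (acc : Array (List Int)) i => acc.push (e i)) a).toList
    = l.foldl (fun (acc : List (List Int)) i => acc ++ [e i]) a.toList := by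
  induction l generalizing a with
  | nil => simp
  | cons i t ih =>
    simp only [List.foldl_cons]
    rw [ih]
    simp

-- A's loop over a block of indices that never hit n_windows - 1: pure accumulation.
theorem preq_prefix (interval chunk_size n_instances nw : Int)
    (l : List Int) (hne : ∀ i ∈ l, i ≠ nw - 1) (acc : List (List Int)) (lb : Int) :
    l.foldl
      (fun (st : List (List Int) × Int) i =>
        let lower_bound := st.2 + interval
        let upper_bound := if i = nw - 1 then n_instances else lower_bound + chunk_size
        (st.1 ++ [[lower_bound, upper_bound]], lower_bound))
      (acc, lb)
    = (acc ++ (List.range l.length).map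
        (fun (k : Nat) => [lb + ((k : Int) + 1) * interval, lb + ((k : Int) + 1) * interval + chunk_size]),
       lb + (l.length : Int) * interval) := by
  induction l generalizing acc lb with
  | nil => simp
  | cons i t ih =>
    simp only [List.foldl_cons]
    rw [if_neg (hne i (by simp))]
    rw [ih (fun j hj => hne j (by simp [hj]))]
    rw [Prod.mk.injEq]
    constructor
    · rw [List.append_assoc]
      congr 1
      rw [List.length_cons, List.range_succ_eq_map, List.map_cons, List.map_map]
      push_cast
      norm_num
      intro a _
      ring
    · rw [List.length_cons]
      push_cast
      ring

-- B's appending fold is a map.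
theorem foldl_append_map (l : List Int) (f : Int → List Int) (init : List (List Int)) :
    l.foldl (fun acc i => acc ++ [f i]) init = init ++ l.map f := by
  induction l generalizing init with
  | nil => simp
  | cons i t ih => simp [ih]

theorem prequential_eq (n_chunks n_instances interval chunk_size : Int) :
    prequential n_chunks n_instances interval chunk_size
      = prequential_alt n_chunks n_instances interval chunk_size := by
  unfold prequential prequential_alt
  dsimp only
  rw [show (((PySem.List.pyRange 0 ((n_chunks - 1) * 2) 1).foldl
        (fun (st : Array (List Int) × Int) i =>
          (st.1.push [st.2 + interval,
              if i = (n_chunks - 1) * 2 - 1 then n_instances else st.2 + interval + chunk_size],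
           st.2 + interval)) (#[], -interval)).1.toList)
      = ((PySem.List.pyRange 0 ((n_chunks - 1) * 2) 1).foldl
        (fun (st : List (List Int) × Int) i =>
          (st.1 ++ [[st.2 + interval,
              if i = (n_chunks - 1) * 2 - 1 then n_instances else st.2 + interval + chunk_size]],
           st.2 + interval)) ((#[] : Array (List Int)).toList, -interval)).1
    from congrArg Prod.fst (foldl_push_pair _
      (fun b i => [b + interval, if i = (n_chunks - 1) * 2 - 1 then n_instances else b + interval + chunk_size])
      (fun b _ => b + interval) #[] (-interval))]
  rw [foldl_push_simple _
      (fun i => [i * interval, i * interval + chunk_size]) #[[((n_chunks - 1) * 2 - 1) * interval, n_instances]]]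
  set nw : Int := (n_chunks - 1) * 2 with hnw
  by_cases h : nw ≤ 0
  · rw [PySem.List.pyRange_one_eq_nil h, if_pos h]
    simp
  · rw [if_neg h]
    have h1 : (0 : Int) ≤ nw - 1 := by omega
    -- A side: split the range at its last index
    have hsplit : PySem.List.pyRange 0 nw 1
        = PySem.List.pyRange 0 (nw - 1) 1 ++ [nw - 1] := by
      have := PySem.List.pyRange_one_succ_right (a := 0) (b := nw - 1) h1
      simpa using this
    rw [hsplit, List.foldl_append]
    rw [preq_prefix interval chunk_size n_instances nw _
      (fun i hi => by
        have := (PySem.List.mem_pyRange_one).1 hi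
        omega) [] (-interval)]
    have hlen : ((PySem.List.pyRange 0 (nw - 1) 1).length : Int) = nw - 1 := by
      rw [PySem.List.length_pyRange_one]; omega
    simp only [List.foldl_cons, List.foldl_nil, List.nil_append, hlen, ite_true]
    -- B side: the reversed buffer
    rw [foldl_append_map (f := fun i => [i * interval, i * interval + chunk_size])]
    rw [PySem.List.pyRange_neg_one_eq_reverse]
    have : ((-1 : Int) + 1) = 0 := by norm_num
    rw [this]
    have : (nw - 2 + 1) = nw - 1 := by ring
    rw [this]
    rw [List.map_reverse]
    simp only [List.reverse_reverse, List.reverse_cons, List.singleton_append]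
    congr 1
    · rw [PySem.List.pyRange_one (a := 0) (b := nw - 1), List.map_map]
      simp only [List.length_map, List.length_range]
      apply List.map_congr_left
      intro k _
      simp only [Function.comp_apply]
      ring_nf
    · norm_num


-- ===== VERDICT (by name: the statement is the Claim_ definition above) =====
theorem prequential_spec : Claim_equal_prequential := by
  intro a b c d _
  unfold Spec_prequential
  exact prequential_eq a b c d
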